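-- pv_equiv track=rewrite | github.com/hojoungjang/programming-exercises | 컨베이어-벨트-위의-로봇/solution.py | solution
-- ===== SOURCE A (Python) =====
-- from collections import deque
--
-- def solution(n, k, belt):
--     def move_robots():
--         robots[n-1] = 0
--         for i in reversed(range(n-1)):
--             if robots[i] == 0:
--                 continue
--             if belt_q[i+1] > 0 and robots[i+1] == 0:
--                 belt_q[i+1] -= 1
--                 robots[i+1] = 1
--                 robots[i] = 0
--         robots[n-1] = 0
--
--     """Solution Main Function"""
--     stage = 0
--     belt_q = deque(belt)
--     robots = deque([0 for _ in range(2*n)])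
--
--     while belt_q.count(0) < k:
--         # move belt
--         belt_q.rotate(1)
--         robots.rotate(1)
--
--         # move robots
--         move_robots()
--
--         # put new robot
--         if belt_q[0] > 0:
--             robots[0] = 1
--             belt_q[0] -= 1
--
--         stage += 1
--     return stage
-- ===== SOURCE B (Python) =====
-- def solution(n, k, belt):
--     """Event-style simulation: robots are kept as a strictly decreasing list of
--     logical positions (no occupancy array), the belt rotates virtually via a head
--     index, and the number of zero-durability cells is maintained incrementally
--     instead of being recounted every stage."""
--     m = 2 * n
--     dur = list(belt)
--     zeros = sum(1 for x in dur if x == 0)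
--     robots = []          # strictly decreasing logical positions, each in [0, n-2]
--     h = 0                # logical cell i lives at dur[(h + i) % m]
--     stage = 0
--     while zeros < k:
--         h = (h - 1) % m                                   # belt rotates right by one
--         shifted = [p + 1 for p in robots if p + 1 < n - 1]  # robots ride; unload at n-1
--         out = []
--         prev = n                                          # nearest robot ahead (none yet)
--         for p in shifted:
--             q = p + 1
--             j = (h + q) % m
--             if dur[j] > 0 and q != prev:                  # robot steps forward
--                 dur[j] -= 1
--                 if dur[j] == 0:
--                     zeros += 1
--                 prev = q
--                 if q < n - 1:                             # reached n-1: unloads, gone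
--                     out.append(q)
--             else:
--                 prev = p
--                 out.append(p)
--         if dur[h] > 0:                                    # new robot enters at cell 0
--             dur[h] -= 1
--             if dur[h] == 0:
--                 zeros += 1
--             out.append(0)
--         robots = out
--         stage += 1
--     return stage
-- ===== Notes on version B (the rewrite author's own statement) =====
-- stated objective: alternative
-- what changed: Replaces the rotated occupancy deque and per-stage full scans by an event-style state: robots are a strictly decreasing list of logical positions (the move pass iterates over robots only, with a prev-position blocking test, instead of sweeping all n-1 cells), the belt rotates virtually via a head index, and the zero-durability count is maintained incrementally instead of recounting the deque each stage.
-- outside the precondition, e.g. on solution(1, 1, [1, 2, 3]): A returns 3, B returns 2; on solution(2, 1, [1, 1, 1]): A returns 1, B raises IndexError; on solution(1, 1, [-1, 3]): A returns 5, B returns 5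
import Mathlib
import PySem

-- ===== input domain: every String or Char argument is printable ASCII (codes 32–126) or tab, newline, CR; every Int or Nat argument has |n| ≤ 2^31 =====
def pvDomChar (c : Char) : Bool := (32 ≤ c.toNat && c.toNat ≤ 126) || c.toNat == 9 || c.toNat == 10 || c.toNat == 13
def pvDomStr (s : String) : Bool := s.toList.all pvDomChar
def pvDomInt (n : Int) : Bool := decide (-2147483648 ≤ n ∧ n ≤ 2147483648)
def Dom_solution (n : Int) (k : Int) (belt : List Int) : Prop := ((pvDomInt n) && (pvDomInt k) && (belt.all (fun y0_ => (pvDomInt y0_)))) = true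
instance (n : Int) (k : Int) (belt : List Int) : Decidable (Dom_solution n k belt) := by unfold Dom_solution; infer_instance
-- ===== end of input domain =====

-- B keeps the robots as a strictly decreasing list of logical positions (no occupancy
-- array: the move pass iterates over the robots only), rotates the belt virtually via a
-- head index, and maintains the zero-durability count incrementally (objective:
-- alternative algorithmic decomposition). Return value only; no observable mutation.
-- Both loop ports take the same fuel argument, which on Pre_ bounds the number of
-- stages of the Python while-loop (the theorem holds for every fuel value as long as
-- both ports receive the same one).
def pvFuel (n : Int) (belt : List Int) : Nat := ((2 * n + 2) * (belt.sum + 2 * n + 2)).toNat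

-- ===== PORT A =====
-- deque.rotate(1): last element moves to the front
def pvRot1 (xs : List Int) : List Int := xs.drop (xs.length - 1) ++ xs.take (xs.length - 1)

-- body of A's inner for-loop (one index i of reversed(range(n-1)))
def pvFA (s : List Int × List Int) (i : Nat) : List Int × List Int :=
  if s.2.getD i 0 = 0 then s
  else if s.1.getD (i + 1) 0 > 0 ∧ s.2.getD (i + 1) 0 = 0 then
    (s.1.set (i + 1) (s.1.getD (i + 1) 0 - 1), (s.2.set (i + 1) 1).set i 0)
  else s

-- move_robots(): robots[n-1]=0; for i in reversed(range(n-1)): …; robots[n-1]=0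
-- (all indexing is in range under Pre_; getD 0 stands for the deque access)
def pvMoveA (n : Nat) (s : List Int × List Int) : List Int × List Int :=
  let s : List Int × List Int := (s.1, s.2.set (n - 1) 0)
  let s := (List.range (n - 1)).reverse.foldl pvFA s
  (s.1, s.2.set (n - 1) 0)

def pvLoopA (k : Int) (n : Nat) : Nat → List Int → List Int → Int → Int
  | 0, _, _, stage => stage
  | f + 1, bq, rb, stage =>
    if (bq.count 0 : Int) < k then
      let s := pvMoveA n (pvRot1 bq, pvRot1 rb)
      let s := if s.1.getD 0 0 > 0 then (s.1.set 0 (s.1.getD 0 0 - 1), s.2.set 0 1) else s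
      pvLoopA k n f s.1 s.2 (stage + 1)
    else stage

def solution (n : Int) (k : Int) (belt : List Int) : Int :=
  pvLoopA k n.toNat (pvFuel n belt) belt (List.replicate (2 * n).toNat 0) 0

-- ===== PORT B =====
-- body of B's inner for-loop over the shifted robot positions; state =
-- (dur, zeros, out, prev) — python's `for p in shifted: …`
def pvSw (n m h : Nat) (s : List Int × Int × List Nat × Nat) (p : Nat) :
    List Int × Int × List Nat × Nat :=
  let q := p + 1
  let j := (h + q) % m
  if s.1.getD j 0 > 0 ∧ q ≠ s.2.2.2 then
    let d := s.1.set j (s.1.getD j 0 - 1)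
    (d, if d.getD j 0 = 0 then s.2.1 + 1 else s.2.1,
      if q < n - 1 then s.2.2.1 ++ [q] else s.2.2.1, q)
  else (s.1, s.2.1, s.2.2.1 ++ [p], p)

-- one stage of B: virtual rotation h←(h-1)%m (written (h+m-1)%m, equal for 0 ≤ h < m),
-- shift robots (unloading at n-1), robot pass over the robots only, spawn at logical 0
def pvStepAlt (n m : Nat) (dur : List Int) (z : Int) (ps : List Nat) (h : Nat) :
    List Int × Int × List Nat × Nat :=
  let h' := (h + m - 1) % m
  let shifted := (ps.map (· + 1)).filter (· < n - 1)
  let s := shifted.foldl (pvSw n m h') (dur, z, ([] : List Nat), n)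
  if s.1.getD h' 0 > 0 then
    let d := s.1.set h' (s.1.getD h' 0 - 1)
    (d, if d.getD h' 0 = 0 then s.2.1 + 1 else s.2.1, s.2.2.1 ++ [0], h')
  else (s.1, s.2.1, s.2.2.1, h')

def pvLoopAlt (k : Int) (n m : Nat) : Nat → List Int → Int → List Nat → Nat → Int → Int
  | 0, _, _, _, _, stage => stage
  | f + 1, dur, z, ps, h, stage =>
    if z < k then
      let s := pvStepAlt n m dur z ps h
      pvLoopAlt k n m f s.1 s.2.1 s.2.2.1 s.2.2.2 (stage + 1)
    else stage

def solution_alt (n : Int) (k : Int) (belt : List Int) : Int :=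
  pvLoopAlt k n.toNat (2 * n).toNat (pvFuel n belt) belt (belt.count 0 : Int) [] 0 0

-- ===== PRECONDITION & SPEC =====
-- Pre_ keeps (a) the problem's stated domain — belt of length 2n with nonnegative
-- durabilities and k ≤ 2n, on which A terminates and the ports' fuel bound covers the
-- stage count — plus (b) every input whose loop body never runs (k ≤ initial zero
-- count), where A returns 0 at once. Excluded inputs on which A still returns (belt
-- length ≠ 2n, or negative durabilities) are accidents of mismatched deque lengths /
-- untrackable termination; see claim.json cites.
def Pre_solution (n : Int) (k : Int) (belt : List Int) : Prop :=
  (1 ≤ n ∧ (belt.length : Int) = 2 * n ∧ (∀ x ∈ belt, 0 ≤ x) ∧ k ≤ 2 * n)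
  ∨ k ≤ (belt.count 0 : Int)
instance (n : Int) (k : Int) (belt : List Int) : Decidable (Pre_solution n k belt) := by
  unfold Pre_solution; infer_instance

def pvWitness_solution : Int × Int × List Int := (1, 1, [1, 1])

def Spec_solution (n : Int) (k : Int) (belt : List Int) (out : Int) : Prop := out = solution_alt n k belt
instance (n : Int) (k : Int) (belt : List Int) (out : Int) : Decidable (Spec_solution n k belt out) := by unfold Spec_solution; infer_instance

-- ===== CLAIM (what is proved, stated in full; the proofs are below) =====
def Claim_equal_solution : Prop := ∀ (n : Int) (k : Int) (belt : List Int), Dom_solution n k belt → Pre_solution n k belt → Spec_solution n k belt (solution n k belt)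

-- ===== LEMMAS AND PROOFS =====

-- occupancy array of a list of logical robot positions
def pvOcc (m : Nat) (ps : List Nat) : List Int :=
  (List.range m).map (fun i => if i ∈ ps then 1 else 0)

theorem pvRot1_eq_rotate (xs : List Int) : pvRot1 xs = xs.rotate (xs.length - 1) := by
  rw [pvRot1, List.rotate_eq_drop_append_take (Nat.sub_le _ _)]

theorem pv_mod_inj {m i j t : Nat} (hi : i < m) (hj : j < m)
    (h : (i + t) % m = (j + t) % m) : i = j := by
  have : i % m = j % m := Nat.ModEq.add_right_cancel' t h
  rwa [Nat.mod_eq_of_lt hi, Nat.mod_eq_of_lt hj] at this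

theorem pv_getD_rotate (l : List Int) (t j : Nat) (hj : j < l.length) :
    (l.rotate t).getD j 0 = l.getD ((j + t) % l.length) 0 := by
  have h1 : j < (l.rotate t).length := by rwa [List.length_rotate]
  have h2 : (j + t) % l.length < l.length :=
    Nat.mod_lt _ (Nat.lt_of_le_of_lt (Nat.zero_le _) hj)
  rw [List.getD_eq_getElem _ _ h1, List.getD_eq_getElem _ _ h2, List.getElem_rotate]

theorem pv_set_rotate (l : List Int) (t j : Nat) (hj : j < l.length) (v : Int) :
    (l.rotate t).set j v = (l.set ((j + t) % l.length) v).rotate t := by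
  apply List.ext_getElem
  · simp
  · intro i h1 h2
    have him : i < l.length := by simpa using h1
    have hset : ((j + t) % l.length) < (l.set ((j + t) % l.length) v).length := by
      simpa using Nat.mod_lt _ (Nat.lt_of_le_of_lt (Nat.zero_le _) hj)
    rw [List.getElem_set, List.getElem_rotate, List.getElem_rotate, List.getElem_set]
    simp only [List.length_set]
    split_ifs with e1 e2 e2
    · rfl
    · exact absurd (congrArg (fun x => (x + t) % l.length) e1) e2
    · exact absurd (pv_mod_inj him hj e2.symm).symm e1
    · rfl

theorem pv_count_rotate (l : List Int) (t : Nat) (a : Int) :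
    (l.rotate t).count a = l.count a :=
  (List.rotate_perm l t).count_eq a

theorem pv_rot1_rotate (l : List Int) (h m : Nat) (hl : l.length = m) (hm0 : 0 < m) :
    pvRot1 (l.rotate h) = l.rotate ((h + m - 1) % m) :=
  calc pvRot1 (l.rotate h) = (l.rotate h).rotate ((l.rotate h).length - 1) := pvRot1_eq_rotate _
    _ = l.rotate (h + m - 1) := by
          rw [List.length_rotate, hl, List.rotate_rotate]; congr 1; omega
    _ = l.rotate ((h + m - 1) % l.length) := (List.rotate_mod _ _).symm
    _ = l.rotate ((h + m - 1) % m) := by rw [hl]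

theorem pvOcc_length (m : Nat) (ps : List Nat) : (pvOcc m ps).length = m := by
  simp [pvOcc]

theorem pvOcc_getD (m : Nat) (ps : List Nat) (i : Nat) :
    (pvOcc m ps).getD i 0 = if i < m ∧ i ∈ ps then 1 else 0 := by
  by_cases h : i < m
  · have h' : i < (pvOcc m ps).length := by simpa [pvOcc_length]
    rw [List.getD_eq_getElem _ _ h']
    simp [pvOcc, h]
  · rw [List.getD_eq_default]
    · simp [h]
    · simpa [pvOcc_length] using Nat.le_of_not_lt h

theorem pvOcc_congr (m : Nat) {ps qs : List Nat} (h : ∀ j, j ∈ ps ↔ j ∈ qs) :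
    pvOcc m ps = pvOcc m qs := by
  unfold pvOcc
  exact List.map_congr_left (fun i _ => by simp [h i])

theorem pvOcc_set0 (m : Nat) (ps : List Nat) (j : Nat) :
    (pvOcc m ps).set j 0 = pvOcc m (ps.filter (· ≠ j)) := by
  apply List.ext_getElem
  · simp [pvOcc_length]
  · intro i h1 h2
    have him : i < m := by simpa [pvOcc_length] using h2
    rw [List.getElem_set]
    simp only [pvOcc, List.getElem_map, List.getElem_range]
    by_cases e : j = i
    · subst e; simp
    · have e' : ¬ i = j := fun h => e h.symm
      simp [if_neg e, e']

theorem pvOcc_set1 (m : Nat) (ps : List Nat) (j : Nat) :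
    (pvOcc m ps).set j 1 = pvOcc m (j :: ps) := by
  apply List.ext_getElem
  · simp [pvOcc_length]
  · intro i h1 h2
    have him : i < m := by simpa [pvOcc_length] using h2
    rw [List.getElem_set]
    simp only [pvOcc, List.getElem_map, List.getElem_range, List.mem_cons]
    by_cases e : j = i
    · subst e; simp
    · have e' : ¬ i = j := fun h => e h.symm
      simp [if_neg e, e']

theorem pvOcc_rot1 (m : Nat) (ps : List Nat) (hm : 0 < m)
    (hps : ∀ p ∈ ps, p + 1 < m) :
    pvRot1 (pvOcc m ps) = pvOcc m (ps.map (· + 1)) := by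
  rw [pvRot1_eq_rotate, pvOcc_length]
  apply List.ext_getElem
  · simp [pvOcc_length]
  · intro i h1 h2
    have him : i < m := by simpa [pvOcc_length] using h2
    rw [List.getElem_rotate]
    simp only [pvOcc, List.getElem_map, List.getElem_range, List.length_map,
      List.length_range]
    rcases Nat.eq_zero_or_pos i with hi0 | hipos
    · subst hi0
      have e : (0 + (m - 1)) % m = m - 1 := by
        rw [Nat.zero_add, Nat.mod_eq_of_lt (by omega)]
      rw [e]
      have hnot1 : (m - 1) ∉ ps := fun hmem => by have := hps _ hmem; omega
      have hnot2 : (0 : Nat) ∉ ps.map (· + 1) := by simp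
      simp [hnot1, hnot2]
    · have e : (i + (m - 1)) % m = i - 1 := by
        have e2 : i + (m - 1) = (i - 1) + m := by omega
        rw [e2, Nat.add_mod_right, Nat.mod_eq_of_lt (by omega)]
      rw [e]
      have : (i ∈ ps.map (· + 1)) ↔ (i - 1) ∈ ps := by
        constructor
        · intro hm'
          rcases List.mem_map.mp hm' with ⟨p, hp, rfl⟩
          simpa using hp
        · intro hp
          exact List.mem_map.mpr ⟨i - 1, hp, by omega⟩
      simp [this]

theorem pvOcc_nil (m : Nat) : pvOcc m [] = List.replicate m 0 := by
  apply List.ext_getElem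
  · simp [pvOcc_length]
  · intro i h1 h2
    simp [pvOcc]

theorem pv_getD_set_self (l : List Int) (j : Nat) (hj : j < l.length) (v : Int) :
    (l.set j v).getD j 0 = v := by
  rw [List.getD_eq_getElem _ _ (by simpa using hj)]
  simp [List.getElem_set_self]

theorem pv_count_set (l : List Int) (j : Nat) (hj : j < l.length)
    (h0 : l.getD j 0 ≠ 0) (v : Int) :
    (((l.set j v).count 0 : Nat) : Int) = ((l.count 0 : Nat) : Int) + (if v = 0 then 1 else 0) := by
  induction l generalizing j with
  | nil => simp at hj
  | cons a t ih =>
    cases j with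
    | zero =>
      have ha : a ≠ 0 := by simpa using h0
      simp only [List.set_cons_zero, List.count_cons]
      split_ifs <;> simp_all
    | succ j =>
      have h0' : t.getD j 0 ≠ 0 := by simpa using h0
      have hj' : j < t.length := by simpa using hj
      have := ih j hj' h0'
      simp only [List.set_cons_succ, List.count_cons]
      split_ifs <;> push_cast <;> push_cast at this <;> omega

-- a fold of pvFA over unoccupied indices is the identity
theorem pv_fold_id (L : List Nat) (s : List Int × List Int)
    (h : ∀ i ∈ L, s.2.getD i 0 = 0) : L.foldl pvFA s = s := by
  induction L with
  | nil => rfl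
  | cons i t ih =>
    have : pvFA s i = s := by unfold pvFA; rw [if_pos (h i (by simp))]
    rw [List.foldl_cons, this]
    exact ih (fun j hj => h j (by simp [hj]))

-- one step of B's inner fold only appends to the out component
theorem pvSw_one (n m h p : Nat) (d : List Int) (z : Int) (acc : List Nat) (prev : Nat) :
    pvSw n m h (d, z, acc, prev) p
      = ((pvSw n m h (d, z, [], prev) p).1,
         (pvSw n m h (d, z, [], prev) p).2.1,
         acc ++ (pvSw n m h (d, z, [], prev) p).2.2.1,
         (pvSw n m h (d, z, [], prev) p).2.2.2) := by
  unfold pvSw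
  dsimp only
  split_ifs <;> simp

-- B's inner fold only appends to the out component
theorem pvSw_acc (n m h : Nat) (ps : List Nat) (d : List Int) (z : Int)
    (acc : List Nat) (prev : Nat) :
    ps.foldl (pvSw n m h) (d, z, acc, prev)
      = ((ps.foldl (pvSw n m h) (d, z, [], prev)).1,
         (ps.foldl (pvSw n m h) (d, z, [], prev)).2.1,
         acc ++ (ps.foldl (pvSw n m h) (d, z, [], prev)).2.2.1,
         (ps.foldl (pvSw n m h) (d, z, [], prev)).2.2.2) := by
  induction ps generalizing d z acc prev with
  | nil => simp
  | cons p t ih =>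
    rcases h0 : pvSw n m h (d, z, ([] : List Nat), prev) p with ⟨d0, z0, o0, p0⟩
    simp only [List.foldl_cons, pvSw_one n m h p d z acc prev, h0]
    rw [ih d0 z0 (acc ++ o0) p0, ih d0 z0 o0 p0]
    simp [List.append_assoc]

theorem pvStepAlt_h (n m : Nat) (dur : List Int) (z : Int) (ps : List Nat) (h : Nat) :
    (pvStepAlt n m dur z ps h).2.2.2 = (h + m - 1) % m := by
  unfold pvStepAlt
  dsimp only
  split_ifs <;> rfl

-- the inner robot pass: A's descending sweep over all cells equals B's fold over the
-- robot positions (inside the peeled range all targets are < n-1)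
set_option maxHeartbeats 1000000 in
theorem pv_sweep (n m h' : Nat) (hm : m = 2 * n) (c : Nat) :
    ∀ (ps done : List Nat) (prev : Nat) (dur : List Int) (z : Int),
    dur.length = m → ps.Pairwise (· > ·) → (∀ p ∈ ps, 1 ≤ p ∧ p ≤ c) →
    c + 3 ≤ n → (∀ d ∈ done, c + 1 ≤ d ∧ d ≤ n - 1) →
    (∀ q, q ≤ c + 1 → (q ∈ done ↔ q = prev)) →
    (List.range (c + 1)).reverse.foldl pvFA (dur.rotate h', pvOcc m (ps ++ done))
      = ((ps.foldl (pvSw n m h') (dur, z, [], prev)).1.rotate h',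
         pvOcc m ((ps.foldl (pvSw n m h') (dur, z, [], prev)).2.2.1 ++ done))
    ∧ (ps.foldl (pvSw n m h') (dur, z, [], prev)).2.2.1.Pairwise (· > ·)
    ∧ (∀ j ∈ (ps.foldl (pvSw n m h') (dur, z, [], prev)).2.2.1,
        1 ≤ j ∧ j ≤ c + 1 ∧ j ∉ done)
    ∧ (ps.foldl (pvSw n m h') (dur, z, [], prev)).1.length = m
    ∧ (z = ((dur.count 0 : Nat) : Int) →
        (ps.foldl (pvSw n m h') (dur, z, [], prev)).2.1
          = (((ps.foldl (pvSw n m h') (dur, z, [], prev)).1.count 0 : Nat) : Int)) := by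
  induction c with
  | zero =>
    intro ps done prev dur z hd hpw hb hcn hdone hprev
    have hps : ps = [] := by
      cases ps with
      | nil => rfl
      | cons a t => have := hb a List.mem_cons_self; omega
    subst hps
    have hone : (List.range 1).reverse = [0] := rfl
    rw [hone, pv_fold_id [0] _ (fun i hi => by
      rw [List.mem_singleton] at hi
      subst hi
      rw [pvOcc_getD, if_neg]
      rintro ⟨-, hmem⟩
      rw [List.nil_append] at hmem
      have := hdone 0 hmem
      omega)]
    simp [hd]
  | succ c ih =>
    intro ps done prev dur z hd hpw hb hcn hdone hprev
    have hrev : (List.range (c + 1 + 1)).reverse = (c + 1) :: (List.range (c + 1)).reverse := by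
      rw [List.range_succ, List.reverse_append]
      rfl
    rw [hrev, List.foldl_cons]
    have hnotdone : c + 1 ∉ done := fun hmem => by have := hdone _ hmem; omega
    -- identity step when no robot sits at c+1
    have hid : c + 1 ∉ ps →
        pvFA (dur.rotate h', pvOcc m (ps ++ done)) (c + 1)
          = (dur.rotate h', pvOcc m (ps ++ done)) := by
      intro hnot
      unfold pvFA
      dsimp only
      rw [if_pos]
      rw [pvOcc_getD, if_neg]
      rintro ⟨-, hmem⟩
      rcases List.mem_append.mp hmem with hmem | hmem
      · exact hnot hmem
      · exact hnotdone hmem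
    rcases ps with _ | ⟨p, t⟩
    · rw [hid (by simp), List.foldl_nil]
      obtain ⟨hs1, hs2, hs3, hs4, hs5⟩ := ih [] done prev dur z hd (by simp) (by simp)
        (by omega) (fun d hd' => by have := hdone d hd'; omega)
        (fun q hq => by
          constructor
          · intro hmem
            exact ((hprev q (by omega)).mp hmem)
          · intro he
            exact (hprev q (by omega)).mpr he)
      rw [List.foldl_nil] at hs1 hs2 hs3 hs4 hs5
      exact ⟨hs1, hs2, fun j hj => by have := hs3 j hj; tauto, hs4, hs5⟩
    · have htlt : ∀ x ∈ t, x < p := fun x hx => (List.pairwise_cons.mp hpw).1 x hx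
      by_cases hpe : p = c + 1
      · subst hpe
        -- the robot at the top index c+1 is processed now; its target is c+2
        have hc2m : c + 2 < m := by omega
        have hocc1 : (pvOcc m (((c + 1) :: t) ++ done)).getD (c + 1) 0 = 1 := by
          rw [pvOcc_getD, if_pos ⟨by omega, by simp⟩]
        have hg1 : (dur.rotate h').getD (c + 2) 0 = dur.getD ((c + 2 + h') % m) 0 := by
          rw [pv_getD_rotate _ _ _ (by omega), hd]
        have hcomm : (c + 2 + h') % m = (h' + (c + 1 + 1)) % m := by
          rw [Nat.add_comm]
        have hmemnext : (c + 2 ∈ ((c + 1) :: t) ++ done) ↔ c + 2 = prev := by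
          rw [List.mem_append, List.mem_cons]
          constructor
          · rintro ((he | hmem) | hmem)
            · omega
            · have := htlt _ hmem; omega
            · exact (hprev (c + 2) (by omega)).mp hmem
          · intro he
            exact Or.inr ((hprev (c + 2) (by omega)).mpr he)
        have hoccnext : (pvOcc m (((c + 1) :: t) ++ done)).getD (c + 2) 0
            = if c + 2 = prev then 1 else 0 := by
          rw [pvOcc_getD]
          by_cases hcp : c + 2 = prev
          · rw [if_pos ⟨hc2m, hmemnext.mpr hcp⟩, if_pos hcp]
          · rw [if_neg (fun hx => hcp (hmemnext.mp hx.2)), if_neg hcp]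
        by_cases hbm : dur.getD ((h' + (c + 1 + 1)) % m) 0 > 0 ∧ c + 1 + 1 ≠ prev
        · -- the robot moves to c+2
          have hstepA : pvFA (dur.rotate h', pvOcc m (((c + 1) :: t) ++ done)) (c + 1)
              = ((dur.set ((h' + (c + 1 + 1)) % m)
                    (dur.getD ((h' + (c + 1 + 1)) % m) 0 - 1)).rotate h',
                 pvOcc m (t ++ ((c + 2) :: done))) := by
            unfold pvFA
            dsimp only
            rw [if_neg (by rw [hocc1]; norm_num),
              if_pos ⟨by rw [hg1, hcomm]; exact hbm.1,
                by rw [hoccnext, if_neg (by omega)]⟩]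
            rw [hg1, hcomm, pv_set_rotate _ _ _ (by omega), hd, hcomm,
              pvOcc_set1, pvOcc_set0]
            refine congrArg₂ _ rfl (pvOcc_congr m ?_)
            have hjt : ∀ j, j ∈ t → j ≠ c + 1 := fun j hj => by have := htlt _ hj; omega
            have hjd : ∀ j, j ∈ done → j ≠ c + 1 := fun j hj => by have := hdone _ hj; omega
            intro j
            constructor
            · intro hmem
              obtain ⟨hm1, hm2⟩ := List.mem_filter.mp hmem
              have hne : j ≠ c + 1 := by simpa using hm2
              rcases List.mem_cons.mp hm1 with he | hm1
              · subst he
                exact List.mem_append.mpr (Or.inr List.mem_cons_self)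
              · rcases List.mem_append.mp hm1 with hm1 | hm1
                · rcases List.mem_cons.mp hm1 with he | hm1
                  · exact absurd he hne
                  · exact List.mem_append.mpr (Or.inl hm1)
                · exact List.mem_append.mpr (Or.inr (List.mem_cons_of_mem _ hm1))
            · intro hmem
              rw [List.mem_filter]
              rcases List.mem_append.mp hmem with hm1 | hm1
              · exact ⟨List.mem_cons_of_mem _ (List.mem_append.mpr
                  (Or.inl (List.mem_cons_of_mem _ hm1))), by simpa using hjt j hm1⟩
              · rcases List.mem_cons.mp hm1 with he | hm1
                · subst he
                  exact ⟨List.mem_cons_self, by simp⟩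
                · exact ⟨List.mem_cons_of_mem _ (List.mem_append.mpr (Or.inr hm1)),
                    by simpa using hjd j hm1⟩
          have hstepB : pvSw n m h' (dur, z, [], prev) (c + 1)
              = (dur.set ((h' + (c + 1 + 1)) % m)
                    (dur.getD ((h' + (c + 1 + 1)) % m) 0 - 1),
                 if (dur.set ((h' + (c + 1 + 1)) % m)
                    (dur.getD ((h' + (c + 1 + 1)) % m) 0 - 1)).getD
                      ((h' + (c + 1 + 1)) % m) 0 = 0 then z + 1 else z,
                 [c + 2], c + 1 + 1) := by
            unfold pvSw
            dsimp only
            rw [if_pos hbm, if_pos (show c + 1 + 1 < n - 1 by omega)]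
            rfl
          have hz1 : z = ((dur.count 0 : Nat) : Int) →
              (if (dur.set ((h' + (c + 1 + 1)) % m)
                    (dur.getD ((h' + (c + 1 + 1)) % m) 0 - 1)).getD
                      ((h' + (c + 1 + 1)) % m) 0 = 0 then z + 1 else z)
              = (((dur.set ((h' + (c + 1 + 1)) % m)
                    (dur.getD ((h' + (c + 1 + 1)) % m) 0 - 1)).count 0 : Nat) : Int) := by
            intro hz
            have hv := pv_getD_set_self dur ((h' + (c + 1 + 1)) % m)
              (by rw [hd]; exact Nat.mod_lt _ (by omega))
              (dur.getD ((h' + (c + 1 + 1)) % m) 0 - 1)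
            have hcnt := pv_count_set dur ((h' + (c + 1 + 1)) % m)
              (by rw [hd]; exact Nat.mod_lt _ (by omega)) (by omega)
              (dur.getD ((h' + (c + 1 + 1)) % m) 0 - 1)
            rw [hv, hcnt, ← hz]
            split_ifs <;> omega
          rw [List.foldl_cons, hstepA, hstepB]
          obtain ⟨hs1, hs2, hs3, hs4, hs5⟩ := ih t ((c + 2) :: done) (c + 1 + 1)
            (dur.set ((h' + (c + 1 + 1)) % m) (dur.getD ((h' + (c + 1 + 1)) % m) 0 - 1))
            (if (dur.set ((h' + (c + 1 + 1)) % m)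
                  (dur.getD ((h' + (c + 1 + 1)) % m) 0 - 1)).getD
                    ((h' + (c + 1 + 1)) % m) 0 = 0 then z + 1 else z)
            (by simp [hd]) (List.pairwise_cons.mp hpw).2
            (fun x hx => ⟨(hb x (by simp [hx])).1, by have := htlt x hx; omega⟩)
            (by omega)
            (fun d hd' => by
              rcases List.mem_cons.mp hd' with he | hd'
              · omega
              · have := hdone d hd'; omega)
            (fun q hq => by
              simp only [List.mem_cons]
              constructor
              · rintro (he | hmem)
                · omega
                · have := hdone _ hmem; omega
              · omega)
          rw [hs1, pvSw_acc n m h' t _ _ [c + 2] (c + 1 + 1)]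
          refine ⟨?_, ?_, ?_, hs4, fun hz => hs5 (hz1 hz)⟩
          · refine congrArg₂ _ rfl (pvOcc_congr m ?_)
            intro j
            simp only [List.mem_append, List.mem_cons]
            tauto
          · dsimp only
            rw [List.singleton_append, List.pairwise_cons]
            refine ⟨fun a ha => by have := hs3 a ha; omega, hs2⟩
          · dsimp only
            rw [List.singleton_append]
            intro j hj
            rcases List.mem_cons.mp hj with he | hj
            · subst he
              refine ⟨by omega, by omega, ?_⟩
              intro hmem
              exact hbm.2 ((hprev (c + 2) (by omega)).mp hmem)
            · have := hs3 j hj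
              refine ⟨by omega, by omega, ?_⟩
              intro hmem
              exact this.2.2 (List.mem_cons_of_mem _ hmem)
        · -- the robot cannot move: empty target durability or the cell ahead is taken
          have hstepA : pvFA (dur.rotate h', pvOcc m (((c + 1) :: t) ++ done)) (c + 1)
              = (dur.rotate h', pvOcc m (((c + 1) :: t) ++ done)) := by
            unfold pvFA
            dsimp only
            rw [if_neg (by rw [hocc1]; norm_num), if_neg]
            rintro ⟨hc1, hc2⟩
            rw [hg1, hcomm] at hc1
            rw [hoccnext] at hc2
            by_cases hcp : c + 2 = prev
            · rw [if_pos hcp] at hc2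
              norm_num at hc2
            · exact hbm ⟨hc1, by omega⟩
          have hstepB : pvSw n m h' (dur, z, [], prev) (c + 1)
              = (dur, z, [c + 1], c + 1) := by
            unfold pvSw
            dsimp only
            rw [if_neg hbm]
            rfl
          have hoccc : pvOcc m (((c + 1) :: t) ++ done)
              = pvOcc m (t ++ ((c + 1) :: done)) := by
            apply pvOcc_congr
            intro j
            simp only [List.mem_cons, List.mem_append]
            tauto
          rw [List.foldl_cons, hstepA, hstepB, hoccc]
          obtain ⟨hs1, hs2, hs3, hs4, hs5⟩ := ih t ((c + 1) :: done) (c + 1) dur z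
            hd (List.pairwise_cons.mp hpw).2
            (fun x hx => ⟨(hb x (by simp [hx])).1, by have := htlt x hx; omega⟩)
            (by omega)
            (fun d hd' => by
              rcases List.mem_cons.mp hd' with he | hd'
              · omega
              · have := hdone d hd'; omega)
            (fun q hq => by
              simp only [List.mem_cons]
              constructor
              · rintro (he | hmem)
                · omega
                · have := hdone _ hmem; omega
              · omega)
          rw [hs1, pvSw_acc n m h' t _ _ [c + 1] (c + 1)]
          refine ⟨?_, ?_, ?_, hs4, hs5⟩
          · refine congrArg₂ _ rfl (pvOcc_congr m ?_)
            intro j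
            simp only [List.mem_append, List.mem_cons]
            tauto
          · dsimp only
            rw [List.singleton_append, List.pairwise_cons]
            refine ⟨fun a ha => by
              have h3 := hs3 a ha
              have : a ≠ c + 1 := fun he => h3.2.2 (he ▸ List.mem_cons_self)
              omega, hs2⟩
          · dsimp only
            rw [List.singleton_append]
            intro j hj
            rcases List.mem_cons.mp hj with he | hj
            · subst he
              exact ⟨by omega, by omega, hnotdone⟩
            · have := hs3 j hj
              refine ⟨by omega, by omega, ?_⟩
              intro hmem
              exact this.2.2 (List.mem_cons_of_mem _ hmem)
      · -- the top index c+1 carries no robot: no-op, recurse with the same robots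
        have hplt : p < c + 1 := by
          have := hb p List.mem_cons_self
          omega
        have hnot : c + 1 ∉ p :: t := by
          intro hmem
          rcases List.mem_cons.mp hmem with he | hmem
          · omega
          · have := htlt _ hmem; omega
        rw [hid hnot]
        obtain ⟨hs1, hs2, hs3, hs4, hs5⟩ := ih (p :: t) done prev dur z hd hpw
          (fun x hx => ⟨(hb x hx).1, by
            rcases List.mem_cons.mp hx with he | hx
            · omega
            · have := htlt x hx; omega⟩)
          (by omega) (fun d hd' => by have := hdone d hd'; omega)
          (fun q hq => hprev q (by omega))
        exact ⟨hs1, hs2, fun j hj => by have := hs3 j hj; tauto, hs4, hs5⟩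

-- one stage: A's loop body on the rotated-deque view equals B's pvStepAlt
theorem pv_stage (n m h : Nat) (hm : m = 2 * n) (hn : 2 ≤ n) (_hh : h < m)
    (dur : List Int) (z : Int) (ps : List Nat)
    (hd : dur.length = m) (hpw : ps.Pairwise (· > ·)) (hb : ∀ p ∈ ps, p ≤ n - 2) :
    (let s := pvMoveA n (pvRot1 (dur.rotate h), pvRot1 (pvOcc m ps));
     if s.1.getD 0 0 > 0 then (s.1.set 0 (s.1.getD 0 0 - 1), s.2.set 0 1) else s)
      = ((pvStepAlt n m dur z ps h).1.rotate ((h + m - 1) % m),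
         pvOcc m (pvStepAlt n m dur z ps h).2.2.1)
    ∧ (pvStepAlt n m dur z ps h).2.2.1.Pairwise (· > ·)
    ∧ (∀ j ∈ (pvStepAlt n m dur z ps h).2.2.1, j ≤ n - 2)
    ∧ (pvStepAlt n m dur z ps h).1.length = m
    ∧ (z = ((dur.count 0 : Nat) : Int) →
        (pvStepAlt n m dur z ps h).2.1
          = (((pvStepAlt n m dur z ps h).1.count 0 : Nat) : Int)) := by
  have hm0 : 0 < m := by omega
  have hh' : (h + m - 1) % m < m := Nat.mod_lt _ hm0
  have r1 : pvRot1 (dur.rotate h) = dur.rotate ((h + m - 1) % m) :=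
    pv_rot1_rotate dur h m hd hm0
  have r2 : pvRot1 (pvOcc m ps) = pvOcc m (ps.map (· + 1)) :=
    pvOcc_rot1 m ps hm0 (fun p hp => by have := hb p hp; omega)
  have hsb : ∀ p ∈ (ps.map (· + 1)).filter (· < n - 1), 1 ≤ p ∧ p ≤ n - 2 := by
    intro p hp
    rcases List.mem_filter.mp hp with ⟨hp1, hp2⟩
    rcases List.mem_map.mp hp1 with ⟨a, _, rfl⟩
    have := of_decide_eq_true hp2
    omega
  have hmap : (ps.map (· + 1)).Pairwise (· > ·) :=
    List.Pairwise.map _ (fun a b hab => by simpa using hab) hpw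
  have hspw : ((ps.map (· + 1)).filter (· < n - 1)).Pairwise (· > ·) :=
    List.Pairwise.sublist List.filter_sublist hmap
  have clear1 : (pvOcc m (ps.map (· + 1))).set (n - 1) 0
      = pvOcc m ((ps.map (· + 1)).filter (· < n - 1)) := by
    rw [pvOcc_set0]
    apply pvOcc_congr
    intro j
    simp only [List.mem_filter, decide_eq_true_eq]
    constructor
    · rintro ⟨hj1, hj2⟩
      rcases List.mem_map.mp hj1 with ⟨a, ha, rfl⟩
      have := hb a ha
      exact ⟨hj1, by omega⟩
    · rintro ⟨hj1, hj2⟩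
      exact ⟨hj1, by omega⟩
  -- the inner pass plus the possible robot parked at n-1
  have hfold : ∃ extra : List Nat,
      (List.range (n - 1)).reverse.foldl pvFA
        (dur.rotate ((h + m - 1) % m),
         pvOcc m ((ps.map (· + 1)).filter (· < n - 1)))
      = (((((ps.map (· + 1)).filter (· < n - 1)).foldl
            (pvSw n m ((h + m - 1) % m)) (dur, z, [], n)).1.rotate ((h + m - 1) % m)),
         pvOcc m (((((ps.map (· + 1)).filter (· < n - 1)).foldl
            (pvSw n m ((h + m - 1) % m)) (dur, z, [], n)).2.2.1) ++ extra))
      ∧ (∀ j ∈ extra, j = n - 1)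
      ∧ ((((ps.map (· + 1)).filter (· < n - 1)).foldl
            (pvSw n m ((h + m - 1) % m)) (dur, z, [], n)).2.2.1).Pairwise (· > ·)
      ∧ (∀ j ∈ ((((ps.map (· + 1)).filter (· < n - 1)).foldl
            (pvSw n m ((h + m - 1) % m)) (dur, z, [], n)).2.2.1), 1 ≤ j ∧ j ≤ n - 2)
      ∧ ((((ps.map (· + 1)).filter (· < n - 1)).foldl
            (pvSw n m ((h + m - 1) % m)) (dur, z, [], n)).1).length = m
      ∧ (z = ((dur.count 0 : Nat) : Int) →
          ((((ps.map (· + 1)).filter (· < n - 1)).foldl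
            (pvSw n m ((h + m - 1) % m)) (dur, z, [], n)).2.1)
          = ((((((ps.map (· + 1)).filter (· < n - 1)).foldl
            (pvSw n m ((h + m - 1) % m)) (dur, z, [], n)).1).count 0 : Nat) : Int)) := by
    rcases hL : ((ps.map (· + 1)).filter (· < n - 1)) with _ | ⟨p, tail⟩
    · refine ⟨[], ?_, by simp, by simp, by simp, by simpa using hd, by simp⟩
      rw [List.foldl_nil,
        pv_fold_id _ _ (fun i _ => by rw [pvOcc_getD]; simp)]
      simp
    · have hp : 1 ≤ p ∧ p ≤ n - 2 := hsb p (by rw [hL]; exact List.mem_cons_self)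
      have hn3 : 3 ≤ n := by omega
      have htb : ∀ x ∈ p :: tail, 1 ≤ x ∧ x ≤ n - 2 := by rw [← hL]; exact hsb
      have htpw : (p :: tail).Pairwise (· > ·) := by rw [← hL]; exact hspw
      have htlt : ∀ x ∈ tail, x < p := fun x hx => (List.pairwise_cons.mp htpw).1 x hx
      have hrange : (List.range (n - 1)).reverse = (n - 2) :: (List.range (n - 2)).reverse := by
        have e : n - 1 = (n - 2) + 1 := by omega
        rw [e, List.range_succ, List.reverse_append]
        rfl
      have e23 : n - 3 + 1 = n - 2 := by omega
      rw [hrange, List.foldl_cons, List.foldl_cons]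
      by_cases hpc : p = n - 2
      · -- the robot at logical n-2 is processed first (its target is n-1)
        rw [← hpc]
        have hocc1 : (pvOcc m (p :: tail)).getD p 0 = 1 := by
          rw [pvOcc_getD, if_pos ⟨by omega, List.mem_cons_self⟩]
        have hg1 : (dur.rotate ((h + m - 1) % m)).getD (p + 1) 0
            = dur.getD ((p + 1 + ((h + m - 1) % m)) % m) 0 := by
          rw [pv_getD_rotate _ _ _ (by omega), hd]
        have hg2 : (pvOcc m (p :: tail)).getD (p + 1) 0 = 0 := by
          rw [pvOcc_getD, if_neg]
          rintro ⟨-, hmem⟩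
          rcases List.mem_cons.mp hmem with he | hmem
          · omega
          · have := htlt _ hmem; omega
        have hcomm : (p + 1 + ((h + m - 1) % m)) % m = (((h + m - 1) % m) + (p + 1)) % m := by
          rw [Nat.add_comm]
        by_cases hmv : dur.getD ((((h + m - 1) % m) + (p + 1)) % m) 0 > 0
        · -- it moves to n-1 (and will be cleared after the pass)
          have hstepA : pvFA (dur.rotate ((h + m - 1) % m), pvOcc m (p :: tail)) p
              = ((dur.set ((((h + m - 1) % m) + (p + 1)) % m)
                    (dur.getD ((((h + m - 1) % m) + (p + 1)) % m) 0 - 1)).rotate ((h + m - 1) % m),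
                 pvOcc m (tail ++ [p + 1])) := by
            unfold pvFA
            dsimp only
            rw [if_neg (by rw [hocc1]; norm_num), if_pos ⟨by rw [hg1, hcomm]; exact hmv, hg2⟩]
            rw [hg1, hcomm, pv_set_rotate _ _ _ (by omega), hd, hcomm,
              pvOcc_set1, pvOcc_set0]
            refine congrArg₂ _ rfl (pvOcc_congr m ?_)
            intro j
            simp only [List.mem_filter, List.mem_cons, List.mem_append,
              List.not_mem_nil, or_false, decide_eq_true_eq]
            constructor
            · rintro ⟨hj1 | hj1 | hj1, hj2⟩
              · exact Or.inr hj1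
              · exact absurd hj1 hj2
              · exact Or.inl hj1
            · rintro (hj | hj)
              · have := htlt _ hj
                exact ⟨Or.inr (Or.inr hj), by omega⟩
              · exact ⟨Or.inl hj, by omega⟩
          have hstepB : pvSw n m ((h + m - 1) % m) (dur, z, [], n) p
              = (dur.set ((((h + m - 1) % m) + (p + 1)) % m)
                    (dur.getD ((((h + m - 1) % m) + (p + 1)) % m) 0 - 1),
                 if (dur.set ((((h + m - 1) % m) + (p + 1)) % m)
                    (dur.getD ((((h + m - 1) % m) + (p + 1)) % m) 0 - 1)).getD
                      ((((h + m - 1) % m) + (p + 1)) % m) 0 = 0 then z + 1 else z,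
                 [], p + 1) := by
            unfold pvSw
            dsimp only
            rw [if_pos ⟨hmv, by omega⟩, if_neg (show ¬(p + 1 < n - 1) by omega)]
          have hz1 : z = ((dur.count 0 : Nat) : Int) →
              (if (dur.set ((((h + m - 1) % m) + (p + 1)) % m)
                    (dur.getD ((((h + m - 1) % m) + (p + 1)) % m) 0 - 1)).getD
                      ((((h + m - 1) % m) + (p + 1)) % m) 0 = 0 then z + 1 else z)
              = (((dur.set ((((h + m - 1) % m) + (p + 1)) % m)
                    (dur.getD ((((h + m - 1) % m) + (p + 1)) % m) 0 - 1)).count 0 : Nat) : Int) := by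
            intro hz
            have hv := pv_getD_set_self dur ((((h + m - 1) % m) + (p + 1)) % m)
              (by rw [hd]; exact Nat.mod_lt _ hm0)
              (dur.getD ((((h + m - 1) % m) + (p + 1)) % m) 0 - 1)
            have hcnt := pv_count_set dur ((((h + m - 1) % m) + (p + 1)) % m)
              (by rw [hd]; exact Nat.mod_lt _ hm0) (by omega)
              (dur.getD ((((h + m - 1) % m) + (p + 1)) % m) 0 - 1)
            rw [hv, hcnt, ← hz]
            split_ifs <;> omega
          rw [hstepA, hstepB]
          obtain ⟨hs1, hs2, hs3, hs4, hs5⟩ := pv_sweep n m ((h + m - 1) % m) hm (n - 3)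
            tail [p + 1] (p + 1)
            (dur.set ((((h + m - 1) % m) + (p + 1)) % m)
              (dur.getD ((((h + m - 1) % m) + (p + 1)) % m) 0 - 1))
            (if (dur.set ((((h + m - 1) % m) + (p + 1)) % m)
                  (dur.getD ((((h + m - 1) % m) + (p + 1)) % m) 0 - 1)).getD
                    ((((h + m - 1) % m) + (p + 1)) % m) 0 = 0 then z + 1 else z)
            (by simp [hd]) (List.pairwise_cons.mp htpw).2
            (fun x hx => ⟨(htb x (by simp [hx])).1, by have := htlt x hx; omega⟩)
            (by omega) (fun d hd' => by rw [List.mem_singleton] at hd'; omega)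
            (fun q hq => by simp)
          rw [show n - 3 + 1 = p from by omega] at hs1
          refine ⟨[p + 1], hs1, ?_, hs2, ?_, hs4, fun hz => hs5 (hz1 hz)⟩
          · intro j hj
            rw [List.mem_singleton] at hj
            omega
          · intro j hj
            have := hs3 j hj
            omega
        · -- blocked by an empty cell n-1: it stays at n-2
          have hstepA : pvFA (dur.rotate ((h + m - 1) % m), pvOcc m (p :: tail)) p
              = (dur.rotate ((h + m - 1) % m), pvOcc m (p :: tail)) := by
            unfold pvFA
            dsimp only
            rw [if_neg (by rw [hocc1]; norm_num), if_neg]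
            rintro ⟨hc1, -⟩
            rw [hg1, hcomm] at hc1
            exact hmv hc1
          have hstepB : pvSw n m ((h + m - 1) % m) (dur, z, [], n) p
              = (dur, z, [p], p) := by
            unfold pvSw
            dsimp only
            rw [if_neg (by rintro ⟨hc1, -⟩; exact hmv hc1)]
            rfl
          have hoccc : pvOcc m (p :: tail) = pvOcc m (tail ++ [p]) := by
            apply pvOcc_congr
            intro j
            simp only [List.mem_cons, List.mem_append]
            tauto
          rw [hstepA, hstepB, hoccc]
          obtain ⟨hs1, hs2, hs3, hs4, hs5⟩ := pv_sweep n m ((h + m - 1) % m) hm (n - 3)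
            tail [p] p dur z
            hd (List.pairwise_cons.mp htpw).2
            (fun x hx => ⟨(htb x (by simp [hx])).1, by have := htlt x hx; omega⟩)
            (by omega) (fun d hd' => by rw [List.mem_singleton] at hd'; omega)
            (fun q hq => by simp)
          rw [show n - 3 + 1 = p from by omega] at hs1
          rw [pvSw_acc n m ((h + m - 1) % m) tail dur z [p] p]
          refine ⟨[], ?_, by simp, ?_, ?_, hs4, hs5⟩
          · rw [hs1, List.append_nil]
            refine congrArg₂ _ rfl (pvOcc_congr m ?_)
            intro j
            simp only [List.mem_append, List.mem_cons]
            tauto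
          · dsimp only
            rw [List.singleton_append, List.pairwise_cons]
            refine ⟨?_, hs2⟩
            intro a ha
            have h3 := hs3 a ha
            simp only [List.mem_singleton] at h3
            omega
          · dsimp only
            rw [List.singleton_append]
            intro j hj
            rcases List.mem_cons.mp hj with he | hj
            · subst he; omega
            · have := hs3 j hj
              omega
      · -- no robot at logical n-2: the first sweep index is a no-op
        have hplt : p < n - 2 := lt_of_le_of_ne hp.2 hpc
        have hstepA : pvFA (dur.rotate ((h + m - 1) % m), pvOcc m (p :: tail)) (n - 2)
            = (dur.rotate ((h + m - 1) % m), pvOcc m (p :: tail)) := by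
          unfold pvFA
          dsimp only
          rw [if_pos]
          rw [pvOcc_getD, if_neg]
          rintro ⟨-, hmem⟩
          rcases List.mem_cons.mp hmem with he | hmem
          · omega
          · have := htlt _ hmem; omega
        rw [hstepA, ← List.foldl_cons (f := pvSw n m ((h + m - 1) % m))]
        obtain ⟨hs1, hs2, hs3, hs4, hs5⟩ := pv_sweep n m ((h + m - 1) % m) hm (n - 3)
          (p :: tail) [] n dur z
          hd htpw
          (fun x hx => ⟨(htb x hx).1, by
            rcases List.mem_cons.mp hx with he | hx
            · omega
            · have := htlt x hx; omega⟩)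
          (by omega) (by simp) (fun q hq => by simp; omega)
        rw [e23] at hs1
        rw [List.append_nil] at hs1
        refine ⟨[], ?_, by simp, hs2, ?_, hs4, hs5⟩
        · rw [hs1, List.append_nil]
        · intro j hj
          have := hs3 j hj
          omega
  obtain ⟨extra, hf1, hex, hopw, hob, holen, hoz⟩ := hfold
  have hlen' : (((ps.map (· + 1)).filter (· < n - 1)).foldl
      (pvSw n m ((h + m - 1) % m)) (dur, z, [], n)).1.length = m := holen
  have clear2 : (pvOcc m ((((ps.map (· + 1)).filter (· < n - 1)).foldl
      (pvSw n m ((h + m - 1) % m)) (dur, z, [], n)).2.2.1 ++ extra)).set (n - 1) 0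
      = pvOcc m ((((ps.map (· + 1)).filter (· < n - 1)).foldl
      (pvSw n m ((h + m - 1) % m)) (dur, z, [], n)).2.2.1) := by
    rw [pvOcc_set0]
    apply pvOcc_congr
    intro j
    simp only [List.mem_filter, List.mem_append, decide_eq_true_eq]
    constructor
    · rintro ⟨hj1 | hj1, hj2⟩
      · exact hj1
      · exact absurd (hex j hj1) hj2
    · intro hj
      have := hob j hj
      exact ⟨Or.inl hj, by omega⟩
  have hget0 : ((((ps.map (· + 1)).filter (· < n - 1)).foldl
      (pvSw n m ((h + m - 1) % m)) (dur, z, [], n)).1.rotate ((h + m - 1) % m)).getD 0 0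
      = (((ps.map (· + 1)).filter (· < n - 1)).foldl
      (pvSw n m ((h + m - 1) % m)) (dur, z, [], n)).1.getD ((h + m - 1) % m) 0 := by
    rw [pv_getD_rotate _ _ _ (by omega), hlen', Nat.zero_add, Nat.mod_eq_of_lt hh']
  have hset0 : ∀ v, ((((ps.map (· + 1)).filter (· < n - 1)).foldl
      (pvSw n m ((h + m - 1) % m)) (dur, z, [], n)).1.rotate ((h + m - 1) % m)).set 0 v
      = ((((ps.map (· + 1)).filter (· < n - 1)).foldl
      (pvSw n m ((h + m - 1) % m)) (dur, z, [], n)).1.set ((h + m - 1) % m) v).rotate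
        ((h + m - 1) % m) := by
    intro v
    rw [pv_set_rotate _ _ _ (by omega), hlen', Nat.zero_add, Nat.mod_eq_of_lt hh']
  have hset1 : (pvOcc m ((((ps.map (· + 1)).filter (· < n - 1)).foldl
      (pvSw n m ((h + m - 1) % m)) (dur, z, [], n)).2.2.1)).set 0 1
      = pvOcc m (((((ps.map (· + 1)).filter (· < n - 1)).foldl
      (pvSw n m ((h + m - 1) % m)) (dur, z, [], n)).2.2.1) ++ [0]) := by
    rw [pvOcc_set1]
    apply pvOcc_congr
    intro j
    simp only [List.mem_cons, List.mem_append]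
    tauto
  simp only [pvMoveA, pvStepAlt, r1, r2, clear1, hf1]
  rw [clear2, hget0]
  by_cases hs : (((ps.map (· + 1)).filter (· < n - 1)).foldl
      (pvSw n m ((h + m - 1) % m)) (dur, z, [], n)).1.getD ((h + m - 1) % m) 0 > 0
  · rw [if_pos hs, if_pos hs]
    refine ⟨by rw [hset0, hset1], ?_, ?_, ?_, ?_⟩
    · dsimp only
      rw [List.pairwise_append]
      refine ⟨hopw, List.pairwise_singleton _ _, ?_⟩
      intro a ha b hb
      rw [List.mem_singleton] at hb
      subst hb
      have := hob a ha
      omega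
    · dsimp only
      intro j hj
      rcases List.mem_append.mp hj with hj | hj
      · exact (hob j hj).2
      · rw [List.mem_singleton] at hj; omega
    · simpa using hlen'
    · intro hz
      dsimp only
      have hv := pv_getD_set_self (((ps.map (· + 1)).filter (· < n - 1)).foldl
        (pvSw n m ((h + m - 1) % m)) (dur, z, [], n)).1 ((h + m - 1) % m)
        (by omega) ((((ps.map (· + 1)).filter (· < n - 1)).foldl
        (pvSw n m ((h + m - 1) % m)) (dur, z, [], n)).1.getD ((h + m - 1) % m) 0 - 1)
      have hcnt := pv_count_set (((ps.map (· + 1)).filter (· < n - 1)).foldl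
        (pvSw n m ((h + m - 1) % m)) (dur, z, [], n)).1 ((h + m - 1) % m)
        (by omega) (by omega) ((((ps.map (· + 1)).filter (· < n - 1)).foldl
        (pvSw n m ((h + m - 1) % m)) (dur, z, [], n)).1.getD ((h + m - 1) % m) 0 - 1)
      rw [hv, hcnt, ← hoz hz]
      split_ifs <;> omega
  · rw [if_neg hs, if_neg hs]
    exact ⟨rfl, hopw, fun j hj => (hob j hj).2, hlen', hoz⟩

theorem pv_loop (k : Int) (n m : Nat) (hm : m = 2 * n) (hn : 2 ≤ n) :
    ∀ (f : Nat) (dur : List Int) (z : Int) (ps : List Nat) (h : Nat) (stage : Int),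
    dur.length = m → h < m → z = ((dur.count 0 : Nat) : Int) →
    ps.Pairwise (· > ·) → (∀ p ∈ ps, p ≤ n - 2) →
    pvLoopA k n f (dur.rotate h) (pvOcc m ps) stage = pvLoopAlt k n m f dur z ps h stage := by
  intro f
  induction f with
  | zero => intro dur z ps h stage _ _ _ _ _; rfl
  | succ f ih =>
    intro dur z ps h stage hd hh hz hpw hb
    have hm0 : 0 < m := by omega
    have hstage := pv_stage n m h hm hn hh dur z ps hd hpw hb
    simp only [pvLoopA, pvLoopAlt, pv_count_rotate]
    rw [← hz]
    by_cases hc : z < k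
    · rw [if_pos hc, if_pos hc]
      have hbody := hstage.1
      dsimp only at hbody
      rw [hbody, pvStepAlt_h]
      exact ih _ _ _ _ _ hstage.2.2.2.1 (Nat.mod_lt _ hm0) (hstage.2.2.2.2 hz)
        hstage.2.1 hstage.2.2.1
    · rw [if_neg hc, if_neg hc]

-- n = 1: the robot machinery is inert on both sides (A's sweep range is empty and B's
-- shifted list is always empty); only the belt evolves
theorem pv_loop_one (k : Int) :
    ∀ (f : Nat) (dur rb : List Int) (z : Int) (ps : List Nat) (h : Nat) (stage : Int),
    dur.length = 2 → h < 2 → z = ((dur.count 0 : Nat) : Int) →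
    pvLoopA k 1 f (dur.rotate h) rb stage = pvLoopAlt k 1 2 f dur z ps h stage := by
  intro f
  induction f with
  | zero => intro dur rb z ps h stage _ _ _; rfl
  | succ f ih =>
    intro dur rb z ps h stage hd hh hz
    simp only [pvLoopA, pvLoopAlt, pv_count_rotate]
    rw [← hz]
    by_cases hc : z < k
    · rw [if_pos hc, if_pos hc]
      have hh2 : (h + 2 - 1) % 2 < 2 := Nat.mod_lt _ (by omega)
      have hrot : pvRot1 (dur.rotate h) = dur.rotate ((h + 2 - 1) % 2) :=
        pv_rot1_rotate dur h 2 hd (by omega)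
      have hget : (dur.rotate ((h + 2 - 1) % 2)).getD 0 0 = dur.getD ((h + 2 - 1) % 2) 0 := by
        rw [pv_getD_rotate _ _ _ (by omega), hd, Nat.zero_add, Nat.mod_eq_of_lt hh2]
      have hset : ∀ v, (dur.rotate ((h + 2 - 1) % 2)).set 0 v
          = (dur.set ((h + 2 - 1) % 2) v).rotate ((h + 2 - 1) % 2) := by
        intro v
        rw [pv_set_rotate _ _ _ (by omega), hd, Nat.zero_add, Nat.mod_eq_of_lt hh2]
      have hshift : (ps.map (· + 1)).filter (· < 1 - 1) = [] := by
        simp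
      simp only [pvMoveA, pvStepAlt, hshift, List.foldl_nil, Nat.sub_self,
        List.range_zero, List.reverse_nil, hrot, hget]
      by_cases hs : dur.getD ((h + 2 - 1) % 2) 0 > 0
      · rw [if_pos hs, if_pos hs]
        dsimp only
        rw [hset]
        apply ih
        · simp [hd]
        · exact hh2
        · have hv : (dur.set ((h + 2 - 1) % 2) (dur.getD ((h + 2 - 1) % 2) 0 - 1)).getD
              ((h + 2 - 1) % 2) 0 = dur.getD ((h + 2 - 1) % 2) 0 - 1 :=
            pv_getD_set_self _ _ (by omega) _
          have hcnt := pv_count_set dur ((h + 2 - 1) % 2) (by omega)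
            (by omega) (dur.getD ((h + 2 - 1) % 2) 0 - 1)
          rw [hv, hcnt, ← hz]
          split_ifs <;> omega
      · rw [if_neg hs, if_neg hs]
        exact ih dur _ z _ _ _ hd hh2 hz
    · rw [if_neg hc, if_neg hc]

-- ===== VERDICT (by name: the statement is the Claim_ definition above) =====
theorem solution_spec : Claim_equal_solution := by
  intro n k belt _ hpre
  unfold Spec_solution solution solution_alt
  rcases hpre with ⟨hn, hlen, -, -⟩ | hk
  · have hlen' : belt.length = (2 * n).toNat := by omega
    rcases Nat.lt_or_ge n.toNat 2 with h1 | h2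
    · have hn1 : n.toNat = 1 := by omega
      have hm : (2 * n).toNat = 2 := by omega
      rw [hn1, hm]
      have := pv_loop_one k (pvFuel n belt) belt (List.replicate 2 0)
        ((belt.count 0 : Nat) : Int) [] 0 0 (by omega) (by omega) rfl
      simpa [List.rotate_zero] using this
    · have hm : (2 * n).toNat = 2 * n.toNat := by omega
      rw [hm]
      have := pv_loop k n.toNat (2 * n.toNat) rfl h2 (pvFuel n belt) belt
        ((belt.count 0 : Nat) : Int) [] 0 0 (by omega) (by omega) rfl
        (by simp) (by simp)
      simpa [List.rotate_zero, pvOcc_nil] using this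
  · cases hf : pvFuel n belt with
    | zero => rfl
    | succ f =>
      have hnc : ¬ ((belt.count 0 : Int) < k) := not_lt.mpr hk
      simp [pvLoopA, pvLoopAlt, hnc]
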